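-- pv_equiv track=rewrite | github.com/kw-pp/algorithm_Study | doyeon/BOJ/브루트 포스/20210411_boj_12100(2).py | dfs
-- ===== SOURCE A (Python) =====
-- from copy import deepcopy
--
-- def rotate(N, B):
--     new_lst = deepcopy(B)
--     for i in range(N):
--         for j in range(N):
--             new_lst[j][N-i-1] = B[i][j]
--     return new_lst
--
-- def convert(N, B):
--     new_lst = [i for i in B if i!=0]    #0을 제외한 list저장
--     for i in range(1, len(new_lst)):
--         if new_lst[i-1] == new_lst[i]:
--             new_lst[i-1] *= 2
--             new_lst[i] = 0
--     new_lst = [i for i in new_lst if i!=0]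
--     return new_lst + [0]*(N-len(new_lst))    #list길이만큼 오른쪽에 0추가
--
-- def dfs(N, B, count):
--     result = max([max(i) for i in B])
--     if count == 0:
--         return result
--
--     for _ in range(4):
--         C = [convert(N, i) for i in B]    #list한줄씩 변환한뒤 합침
--         result = max(result, dfs(N, C, count-1))
--         B = rotate(N, B)
--     return result
-- ===== SOURCE B (Python) =====
-- def _merge(cells):
--     # drop zeros, then merge each adjacent equal pair exactly once, front to back
--     vals = [v for v in cells if v != 0]
--     out = []
--     i = 0
--     while i < len(vals):
--         if i + 1 < len(vals) and vals[i] == vals[i + 1]: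
--             out.append(2 * vals[i])
--             i += 2
--         else:
--             out.append(vals[i])
--             i += 1
--     return out
--
-- def _slide(N, row):
--     m = _merge(row)
--     return m + [0] * (N - len(m))
--
-- def _rot(N, board):
--     # rotate the N x N play area clockwise on a copied grid
--     out = [row[:] for row in board]
--     for r in range(N):
--         for c in range(N):
--             out[r][c] = board[N - 1 - c][r]
--     return out
--
-- def dfs(N, B, count):
--     best = max(max(row) for row in B)
--     stack = [(B, count)]
--     while stack:
--         board, depth = stack.pop()
--         best = max(best, max(max(row) for row in board))
--         if depth == 0:
--             continue
--         cur = board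
--         for _ in range(4):
--             stack.append(([_slide(N, row) for row in cur], depth - 1))
--             cur = _rot(N, cur)
--     return best
-- ===== Notes on version B (the rewrite author's own statement) =====
-- stated objective: alternative
-- what changed: A is a recursive DFS that merges each row by a two-pass mark-zeros-then-refilter scan and rotates in place by nested index assignments into a deepcopy; B runs the same depth-limited search as an explicit worklist loop over (board, depth) pairs, merges with a single pair-consuming pass, and rotates the N x N play area row by row into a copied grid.
import Mathlib
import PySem

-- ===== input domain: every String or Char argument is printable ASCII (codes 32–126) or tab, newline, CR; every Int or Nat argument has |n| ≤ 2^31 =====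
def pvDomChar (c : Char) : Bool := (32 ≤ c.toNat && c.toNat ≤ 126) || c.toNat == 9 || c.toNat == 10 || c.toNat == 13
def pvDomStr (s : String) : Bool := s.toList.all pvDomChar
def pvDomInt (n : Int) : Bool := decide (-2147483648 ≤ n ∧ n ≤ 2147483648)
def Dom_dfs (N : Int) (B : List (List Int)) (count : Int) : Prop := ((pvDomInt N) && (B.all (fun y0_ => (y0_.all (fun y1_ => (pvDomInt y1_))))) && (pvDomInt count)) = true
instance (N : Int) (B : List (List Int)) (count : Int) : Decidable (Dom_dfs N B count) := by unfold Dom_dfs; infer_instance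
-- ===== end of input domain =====

-- B replaces A's recursive DFS with an explicit worklist loop, A's two-pass
-- mark-zeros-then-refilter merge with a single pair-consuming pass, and A's
-- in-place nested index-assignment rotation with a rotation built on a copied
-- grid row by row (objective: alternative).

-- ===== PORT A =====
-- python max(l) for a list of ints (Pre_ keeps every maxed list nonempty; 0 is never reached)
def pyMaxList (l : List Int) : Int :=
  match PySem.List.max? l (fun y => y) with
  | some m => m
  | none => 0

def convert (N : Int) (row : List Int) : List Int :=
  let nz := row.filter (fun i => i != 0)
  let scanned := (PySem.List.pyRange 1 (nz.length : Int) 1).foldl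
    (fun l i =>
      if PySem.List.pyGetD l (i - 1) 0 == PySem.List.pyGetD l i 0 then
        PySem.List.pySetD (PySem.List.pySetD l (i - 1) (2 * PySem.List.pyGetD l (i - 1) 0)) i 0
      else l) nz
  let nz2 := scanned.filter (fun i => i != 0)
  nz2 ++ List.replicate ((N - (nz2.length : Int)).toNat) 0

def rotate (N : Int) (B : List (List Int)) : List (List Int) :=
  (PySem.List.pyRange 0 N 1).foldl (fun acc i =>
    (PySem.List.pyRange 0 N 1).foldl (fun acc2 j =>
      PySem.List.pySetD acc2 j
        (PySem.List.pySetD (PySem.List.pyGetD acc2 j []) (N - i - 1)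
          (PySem.List.pyGetD (PySem.List.pyGetD B i []) j 0))) acc) B

def dfsA : Nat → Int → List (List Int) → Int
  | 0, _, B => pyMaxList (B.map pyMaxList)
  | f + 1, N, B =>
    ((List.range 4).foldl (fun st _ =>
        (max st.1 (dfsA f N (st.2.map (convert N))), rotate N st.2))
      (pyMaxList (B.map pyMaxList), B)).1

-- count < 0 makes the Python recurse forever (excluded by Pre_); count.toNat totalizes it
def dfs (N : Int) (B : List (List Int)) (count : Int) : Int := dfsA count.toNat N B

-- ===== PORT B =====
-- Source B's _merge: strip zeros, then consume adjacent equal pairs front to back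
def mergeB : List Int → List Int
  | [] => []
  | [x] => [x]
  | x :: y :: rest => if x == y then (2 * x) :: mergeB rest else x :: mergeB (y :: rest)

def slideB (N : Int) (row : List Int) : List Int :=
  let m := mergeB (row.filter (fun v => v != 0))
  m ++ List.replicate ((N - (m.length : Int)).toNat) 0

-- Source B's _rot: out = [row[:] for row in board] (a value copy: the board itself here),
-- then out[r][c] = board[N-1-c][r] for r, c in range(N)
def rotB (N : Int) (board : List (List Int)) : List (List Int) :=
  (PySem.List.pyRange 0 N 1).foldl (fun out r =>
    (PySem.List.pyRange 0 N 1).foldl (fun acc c =>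
      PySem.List.pySetD acc r
        (PySem.List.pySetD (PySem.List.pyGetD acc r []) c
          (PySem.List.pyGetD (PySem.List.pyGetD board (N - 1 - c) []) r 0))) out) board

-- the while-stack loop; Python's list.pop() takes the LAST element, so the Python stack
-- is modelled head-first (the four appended children arrive in reverse order).
-- Python's 'depth == 0: continue' is 'depth ≤ 0' here: it totalizes the count < 0 case
-- (outside Pre_), on which the Python loops forever.
def dfsLoop (N : Int) : List (List (List Int) × Int) → Int → Int
  | [], best => best
  | (board, depth) :: rest, best =>
    let best' := max best (pyMaxList (board.map pyMaxList))
    if h : depth ≤ 0 then dfsLoop N rest best'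
    else
      let b0 := board.map (slideB N)
      let r1 := rotB N board
      let b1 := r1.map (slideB N)
      let r2 := rotB N r1
      let b2 := r2.map (slideB N)
      let r3 := rotB N r2
      let b3 := r3.map (slideB N)
      dfsLoop N ((b3, depth - 1) :: (b2, depth - 1) :: (b1, depth - 1) :: (b0, depth - 1) :: rest) best'
  termination_by stack _ => (stack.map (fun p => 5 ^ p.2.toNat)).sum
  decreasing_by
  · simp only [List.map_cons, List.sum_cons]
    have h0 : 0 < 5 ^ depth.toNat := Nat.pow_pos (by omega)
    omega
  · simp only [List.map_cons, List.sum_cons]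
    have h5 : depth.toNat = (depth - 1).toNat + 1 := by omega
    have h0 : 0 < 5 ^ (depth - 1).toNat := Nat.pow_pos (by omega)
    rw [h5, pow_succ]
    omega

def dfs_alt (N : Int) (B : List (List Int)) (count : Int) : Int :=
  dfsLoop N [(B, count)] (pyMaxList (B.map pyMaxList))

-- ===== PRECONDITION & SPEC =====
-- Pre_ is exactly the closed-form description of the inputs A returns on: count ≥ 0 (a
-- negative count recurses forever), a nonempty board with nonempty rows, and — when a
-- move is actually made (count > 0) — either N ≥ 1 with the board covering the N×N play
-- area (at least N rows, the first N of length at least N; otherwise rotate raises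
-- IndexError), or N ≤ 0 (rotation is then a no-op) with a nonzero in every row
-- (otherwise a row compacts to empty and max raises ValueError).
def Pre_dfs (N : Int) (B : List (List Int)) (count : Int) : Prop :=
  0 ≤ count ∧ B ≠ [] ∧ (∀ r ∈ B, r ≠ []) ∧
    (count = 0 ∨
      (1 ≤ N ∧ N.toNat ≤ B.length ∧ ∀ j < N.toNat, N.toNat ≤ (B.getD j []).length) ∨
      (N ≤ 0 ∧ ∀ r ∈ B, ∃ x ∈ r, x ≠ 0))
instance (N : Int) (B : List (List Int)) (count : Int) : Decidable (Pre_dfs N B count) := by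
  unfold Pre_dfs; infer_instance

def pvWitness_dfs : Int × List (List Int) × Int := (2, [[2, 2], [4, 0]], 2)

def Spec_dfs (N : Int) (B : List (List Int)) (count : Int) (out : Int) : Prop := out = dfs_alt N B count
instance (N : Int) (B : List (List Int)) (count : Int) (out : Int) : Decidable (Spec_dfs N B count out) := by unfold Spec_dfs; infer_instance

-- ===== CLAIM (what is proved, stated in full; the proofs are below) =====
def Claim_equal_dfs : Prop := ∀ (N : Int) (B : List (List Int)) (count : Int), Dom_dfs N B count → Pre_dfs N B count → Spec_dfs N B count (dfs N B count)

-- ===== LEMMAS AND PROOFS =====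

-- ---------- proof-layer notions ----------
def ent (X : List (List Int)) (a b : Nat) : Int := (X.getD a []).getD b 0

-- the board covers the N×N play area (trivially, when there is no play area)
def Win (N : Int) (X : List (List Int)) : Prop :=
  N ≤ 0 ∨ (N.toNat ≤ X.length ∧ ∀ j < N.toNat, N.toNat ≤ (X.getD j []).length)

-- A's merge scan rewritten as a structural recursion ("prev" carries the value at l[i-1])
def go : Int → List Int → List Int
  | p, [] => [p]
  | p, h :: t => if p = h then (2 * p) :: go 0 t else p :: go h t

def bm (X : List (List Int)) : Int := pyMaxList (X.map pyMaxList)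

-- the common closed form of A's rotate and B's _rot on a board covering the play area:
-- entries of the n×n window rotated, everything else untouched
def rotC (n : Nat) (X : List (List Int)) : List (List Int) :=
  (List.range X.length).map (fun r =>
    (List.range (X.getD r []).length).map (fun c =>
      if r < n ∧ c < n then ent X (n - 1 - c) r else (X.getD r []).getD c 0))

-- ---------- generic list lemmas ----------
theorem map_range_getD {α : Type} (d : α) (r : List α) (n : Nat) (h : r.length = n) :
    (List.range n).map (fun i => r.getD i d) = r := by
  subst h
  apply List.ext_getElem (by simp)
  intro i h1 h2
  simp [List.getD_eq_getElem?_getD, *]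

theorem set_map_range {α : Type} (f : Nat → α) (n c : Nat) (v : α) :
    ((List.range n).map f).set c v = (List.range n).map (fun j => if j = c then v else f j) := by
  apply List.ext_getElem (by simp)
  intro i h1 h2
  simp at h1
  rw [List.getElem_set]
  by_cases hic : c = i <;> simp [hic]
  intro h; omega

theorem getD_map_range' {α : Type} (f : Nat → α) (n j : Nat) (d : α) (h : j < n) :
    ((List.range n).map f).getD j d = f j := by
  rw [List.getD_eq_getElem?_getD]
  simp [h]

theorem getD_lt {α : Type} (l : List α) (a : Nat) (d : α) (h : a < l.length) :
    l.getD a d = l[a] := by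
  rw [List.getD_eq_getElem?_getD, List.getElem?_eq_getElem h]
  rfl

theorem set_getD_self {α : Type} (l : List α) (r : Nat) (d : α) (h : r < l.length) :
    l.set r (l.getD r d) = l := by
  apply List.ext_getElem (by simp)
  intro i h1 h2
  rw [List.getElem_set]
  split
  · next hri => subst hri; rw [getD_lt _ _ _ h]
  · rfl

theorem getD_set_self {α : Type} (l : List α) (r : Nat) (x d : α) (h : r < l.length) :
    (l.set r x).getD r d = x := by
  rw [getD_lt _ _ _ (by simpa using h)]
  simp

theorem getD_mid {α : Type} (pre : List α) (p : α) (t : List α) (d : α) :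
    (pre ++ p :: t).getD pre.length d = p := by
  induction pre with
  | nil => simp
  | cons a pre ih => simpa using ih

theorem set_mid {α : Type} (pre : List α) (p v : α) (t : List α) :
    (pre ++ p :: t).set pre.length v = pre ++ v :: t := by
  induction pre with
  | nil => simp
  | cons a pre ih => simpa using ih

theorem max_merge6 (best b c0 c1 c2 c3 : Int) :
    max (max (max (max (max best b) c3) c2) c1) c0
      = max best (max (max (max (max b c0) c1) c2) c3) := by omega

-- ---------- merge lemmas ----------
theorem goFilterAux : ∀ (k : Nat) (t : List Int), t.length ≤ k → ∀ p : Int, p ≠ 0 →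
    (∀ x ∈ t, x ≠ 0) → (go p t).filter (fun v => v != 0) = mergeB (p :: t) := by
  intro k
  induction k with
  | zero =>
    intro t ht p hp _
    have : t = [] := by cases t <;> simp_all
    subst this
    simp [go, mergeB, hp]
  | succ k ih =>
    intro t ht p hp hall
    cases t with
    | nil => simp [go, mergeB, hp]
    | cons h t' =>
      by_cases hph : p = h
      · subst hph
        have h2p : ¬ (2 * p = 0) := by omega
        cases t' with
        | nil => simp [go, mergeB, h2p]
        | cons h' t'' =>
          have hh' : h' ≠ 0 := hall h' (by simp)
          have := ih t'' (by simp at ht ⊢; omega) h' hh' (fun x hx => hall x (by simp [hx]))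
          simp [go, mergeB, h2p, hh'.symm, this]
      · have := ih t' (by simp at ht ⊢; omega) h (hall h (by simp))
          (fun x hx => hall x (by simp [hx]))
        simp [go, mergeB, hph, hp, this]

theorem goFilter (t : List Int) (p : Int) (hp : p ≠ 0) (hall : ∀ x ∈ t, x ≠ 0) :
    (go p t).filter (fun v => v != 0) = mergeB (p :: t) :=
  goFilterAux t.length t le_rfl p hp hall

theorem foldScan : ∀ (t pre : List Int) (p : Int),
    (PySem.List.pyRange ((pre.length : Int) + 1) ((pre.length : Int) + 1 + t.length) 1).foldl
      (fun l i =>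
        if PySem.List.pyGetD l (i - 1) 0 == PySem.List.pyGetD l i 0 then
          PySem.List.pySetD (PySem.List.pySetD l (i - 1) (2 * PySem.List.pyGetD l (i - 1) 0)) i 0
        else l) (pre ++ p :: t) = pre ++ go p t := by
  intro t
  induction t with
  | nil =>
    intro pre p
    rw [PySem.List.pyRange_one_eq_nil (by simp)]
    simp [go]
  | cons h t' ih =>
    intro pre p
    rw [PySem.List.pyRange_one_cons (by push_cast [List.length_cons]; omega)]
    rw [List.foldl_cons]
    have e1 : ((pre.length : Int) + 1 - 1) = ((pre.length : Nat) : Int) := by omega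
    have e2 : ((pre.length : Int) + 1) = (((pre.length + 1 : Nat)) : Int) := by push_cast; ring
    have g1 : PySem.List.pyGetD (pre ++ p :: h :: t') ((pre.length : Int) + 1 - 1) 0 = p := by
      rw [e1, PySem.List.pyGetD_natCast]; exact getD_mid pre p _ 0
    have g2 : PySem.List.pyGetD (pre ++ p :: h :: t') ((pre.length : Int) + 1) 0 = h := by
      rw [e2, PySem.List.pyGetD_natCast]
      rw [show (pre ++ p :: h :: t') = (pre ++ [p]) ++ h :: t' by simp]
      rw [show pre.length + 1 = (pre ++ [p]).length by simp]
      exact getD_mid _ h _ 0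
    rw [g1, g2]
    by_cases hph : p = h
    · subst hph
      rw [if_pos (by simp)]
      rw [e1, PySem.List.pySetD_natCast, set_mid, e2, PySem.List.pySetD_natCast]
      rw [show (pre ++ 2 * p :: p :: t') = ((pre ++ [2*p]) ++ p :: t') by simp]
      rw [show pre.length + 1 = (pre ++ [2*p]).length by simp]
      rw [set_mid]
      rw [show (PySem.List.pyRange (((pre ++ [2*p]).length : Int) + 1) (((pre ++ [2*p]).length : Int) + ((p :: t').length : Int)) 1) = (PySem.List.pyRange (((pre ++ [2*p]).length : Int) + 1) (((pre ++ [2*p]).length : Int) + 1 + (t'.length : Int)) 1) from by congr 1; push_cast [List.length_append, List.length_cons, List.length_nil]; omega]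
      rw [ih (pre ++ [2*p]) 0]
      simp [go]
    · rw [if_neg (by simpa using hph)]
      rw [show (pre ++ p :: h :: t') = ((pre ++ [p]) ++ h :: t') by simp]
      rw [show (PySem.List.pyRange ((pre.length : Int) + 1 + 1) ((pre.length : Int) + 1 + ((h :: t').length : Int)) 1) = (PySem.List.pyRange (((pre ++ [p]).length : Int) + 1) (((pre ++ [p]).length : Int) + 1 + (t'.length : Int)) 1) from by congr 1 <;> (push_cast [List.length_append, List.length_cons, List.length_nil]; omega)]
      rw [ih (pre ++ [p]) h]
      simp [go, hph]

theorem convert_eq_slideB (N : Int) (row : List Int) : convert N row = slideB N row := by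
  have hall : ∀ x ∈ row.filter (fun i => i != 0), x ≠ 0 := by
    intro x hx
    have := List.mem_filter.1 hx
    simpa using this.2
  simp only [convert, slideB]
  revert hall
  generalize row.filter (fun i => i != 0) = nz
  intro hall
  cases nz with
  | nil =>
    rw [PySem.List.pyRange_one_eq_nil (by simp)]
    simp [mergeB]
  | cons h t =>
    rw [show (PySem.List.pyRange 1 (((h :: t).length : Nat) : Int) 1) = (PySem.List.pyRange ((([] : List Int).length : Int) + 1) ((([] : List Int).length : Int) + 1 + (t.length : Int)) 1) from by congr 1 <;> (push_cast [List.length_cons, List.length_nil]; omega)]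
    rw [show (h :: t) = ([] : List Int) ++ h :: t from rfl, foldScan]
    simp only [List.nil_append]
    rw [goFilter t h (hall h (by simp)) (fun x hx => hall x (by simp [hx]))]

-- ---------- rotate = rotC (A's side) ----------
theorem innerPart (N : Int) (n : Nat) (B : List (List Int)) (i : Int)
    (hi0 : 0 ≤ i) (hi : 0 ≤ N - i - 1) (acc : List (List Int)) :
    ∀ (j0 : Nat), j0 ≤ n → n ≤ acc.length →
    (PySem.List.pyRange 0 (j0 : Int) 1).foldl (fun acc2 j =>
      PySem.List.pySetD acc2 j
        (PySem.List.pySetD (PySem.List.pyGetD acc2 j []) (N - i - 1)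
          (PySem.List.pyGetD (PySem.List.pyGetD B i []) j 0))) acc
    = (List.range acc.length).map (fun j => if j < j0 then
        (acc.getD j []).set (N - i - 1).toNat (ent B i.toNat j) else acc.getD j []) := by
  intro j0
  induction j0 with
  | zero =>
    intro _ hL
    rw [show ((0 : Nat) : Int) = (0 : Int) by simp, PySem.List.pyRange_one_eq_nil (by omega)]
    simp only [List.foldl_nil, Nat.not_lt_zero, if_false]
    exact (map_range_getD [] acc acc.length rfl).symm
  | succ j0 ihj =>
    intro hj0 hL
    rw [show ((j0 + 1 : Nat) : Int) = ((j0 : Int) + 1) by push_cast; ring]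
    rw [PySem.List.pyRange_one_succ_right (by omega)]
    rw [List.foldl_append, ihj (by omega) hL]
    simp only [List.foldl_cons, List.foldl_nil]
    rw [PySem.List.pyGetD_natCast, getD_map_range' _ acc.length j0 _ (by omega)]
    rw [if_neg (by omega)]
    rw [PySem.List.pySetD_natCast, PySem.List.pySetD_of_nonneg _ _ hi]
    rw [PySem.List.pyGetD_natCast]
    rw [show i = ((i.toNat : Nat) : Int) from by omega, PySem.List.pyGetD_natCast]
    rw [set_map_range]
    apply List.map_congr_left
    intro j hj
    rw [List.mem_range] at hj
    by_cases hjj : j = j0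
    · subst hjj
      simp [ent, List.getD_eq_getElem?_getD, max_eq_left hi0]
    · rw [if_neg hjj]
      by_cases hlt : j < j0
      · rw [if_pos hlt, if_pos (by omega)]
      · rw [if_neg hlt, if_neg (by omega)]

theorem outerPart (N : Int) (n : Nat) (hn : N.toNat = n) (hN : 1 ≤ N)
    (B : List (List Int)) (hL : n ≤ B.length) (hR : ∀ j < n, n ≤ (B.getD j []).length) :
    ∀ (i0 : Nat), i0 ≤ n →
    (PySem.List.pyRange 0 (i0 : Int) 1).foldl (fun acc i =>
      (PySem.List.pyRange 0 N 1).foldl (fun acc2 j =>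
        PySem.List.pySetD acc2 j
          (PySem.List.pySetD (PySem.List.pyGetD acc2 j []) (N - i - 1)
            (PySem.List.pyGetD (PySem.List.pyGetD B i []) j 0))) acc) B
    = (List.range B.length).map (fun j => if j < n then
        ((List.range (B.getD j []).length).map (fun c =>
          if n - i0 ≤ c ∧ c < n then ent B (n - 1 - c) j else ent B j c))
        else B.getD j []) := by
  intro i0
  induction i0 with
  | zero =>
    intro _
    rw [show PySem.List.pyRange 0 (((0 : Nat) : Nat) : Int) 1 = [] from PySem.List.pyRange_one_eq_nil (by simp)]
    simp only [List.foldl_nil, Nat.sub_zero]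
    have key : ∀ j, ((List.range (B.getD j []).length).map (fun c =>
        if n ≤ c ∧ c < n then ent B (n - 1 - c) j else ent B j c)) = B.getD j [] := by
      intro j
      calc (List.range (B.getD j []).length).map (fun c =>
            if n ≤ c ∧ c < n then ent B (n - 1 - c) j else ent B j c)
          = (List.range (B.getD j []).length).map (fun c => (B.getD j []).getD c 0) := by
            apply List.map_congr_left
            intro c hc
            rw [if_neg (by omega)]
            rfl
        _ = B.getD j [] := map_range_getD 0 _ _ rfl
    symm
    calc (List.range B.length).map (fun j => if j < n then
          ((List.range (B.getD j []).length).map (fun c =>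
            if n - 0 ≤ c ∧ c < n then ent B (n - 1 - c) j else ent B j c))
          else B.getD j [])
        = (List.range B.length).map (fun j => B.getD j []) := by
          apply List.map_congr_left
          intro j hj
          simp only [Nat.sub_zero]
          by_cases hjn : j < n
          · rw [if_pos hjn, key j]
          · rw [if_neg hjn]
      _ = B := map_range_getD [] B B.length rfl
  | succ i0 ih =>
    intro hi0
    rw [show ((i0 + 1 : Nat) : Int) = ((i0 : Int) + 1) by push_cast; ring]
    rw [PySem.List.pyRange_one_succ_right (by omega)]
    rw [List.foldl_append, ih (by omega)]
    simp only [List.foldl_cons, List.foldl_nil]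
    rw [show (PySem.List.pyRange 0 N 1) = (PySem.List.pyRange 0 ((n : Nat) : Int) 1) from by congr 1; omega]
    have hacc : n ≤ ((List.range B.length).map (fun j => if j < n then
        ((List.range (B.getD j []).length).map (fun c =>
          if n - i0 ≤ c ∧ c < n then ent B (n - 1 - c) j else ent B j c))
        else B.getD j [])).length := by simp; omega
    rw [innerPart N n _ (i0 : Int) (by omega) (by omega) _ n le_rfl hacc]
    simp only [List.length_map, List.length_range]
    apply List.map_congr_left
    intro j hj
    rw [List.mem_range] at hj
    by_cases hjn : j < n
    · rw [if_pos hjn, if_pos hjn]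
      rw [getD_map_range' _ B.length j _ hj]
      rw [if_pos hjn]
      have hc0 : ((N - (i0 : Int) - 1)).toNat = n - 1 - i0 := by omega
      rw [hc0]
      rw [set_map_range]
      apply List.map_congr_left
      intro c hc
      rw [List.mem_range] at hc
      by_cases hcc : c = n - 1 - i0
      · rw [if_pos hcc, if_pos (by omega)]
        have : (i0 : Int).toNat = i0 := by omega
        rw [this]
        congr 1
        omega
      · rw [if_neg hcc]
        by_cases hge : n - i0 ≤ c ∧ c < n
        · rw [if_pos hge, if_pos (by omega)]
        · rw [if_neg hge, if_neg (by omega)]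
    · rw [if_neg hjn, if_neg hjn]
      rw [getD_map_range' _ B.length j _ hj]
      rw [if_neg hjn]

-- rotC is the identity when the window is empty (n = 0)
theorem rotC_zero (X : List (List Int)) : rotC 0 X = X := by
  unfold rotC
  calc (List.range X.length).map (fun r =>
        (List.range (X.getD r []).length).map (fun c =>
          if r < 0 ∧ c < 0 then ent X (0 - 1 - c) r else (X.getD r []).getD c 0))
      = (List.range X.length).map (fun r => X.getD r []) := by
        apply List.map_congr_left
        intro r _
        calc (List.range (X.getD r []).length).map (fun c =>
              if r < 0 ∧ c < 0 then ent X (0 - 1 - c) r else (X.getD r []).getD c 0)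
            = (List.range (X.getD r []).length).map (fun c => (X.getD r []).getD c 0) := by
              apply List.map_congr_left
              intro c _
              rw [if_neg (by omega)]
          _ = X.getD r [] := map_range_getD 0 _ _ rfl
    _ = X := map_range_getD [] X X.length rfl

theorem rotate_eq_rotC {N : Int} {X : List (List Int)} (hw : Win N X) :
    rotate N X = rotC N.toNat X := by
  by_cases hneg : N ≤ 0
  · unfold rotate
    rw [PySem.List.pyRange_one_eq_nil hneg]
    simp only [List.foldl_nil]
    rw [show N.toNat = 0 by omega, rotC_zero]
  · have hN : 1 ≤ N := by omega
    rcases hw with h | ⟨hL, hR⟩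
    · omega
    unfold rotate
    rw [show (PySem.List.pyRange 0 N 1).foldl (fun acc i =>
        (PySem.List.pyRange 0 N 1).foldl (fun acc2 j =>
          PySem.List.pySetD acc2 j
            (PySem.List.pySetD (PySem.List.pyGetD acc2 j []) (N - i - 1)
              (PySem.List.pyGetD (PySem.List.pyGetD X i []) j 0))) acc) X
      = (PySem.List.pyRange 0 ((N.toNat : Nat) : Int) 1).foldl (fun acc i =>
        (PySem.List.pyRange 0 N 1).foldl (fun acc2 j =>
          PySem.List.pySetD acc2 j
            (PySem.List.pySetD (PySem.List.pyGetD acc2 j []) (N - i - 1)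
              (PySem.List.pyGetD (PySem.List.pyGetD X i []) j 0))) acc) X from by congr 2; omega]
    rw [outerPart N N.toNat rfl hN X hL hR N.toNat le_rfl]
    unfold rotC
    apply List.map_congr_left
    intro j hj
    rw [List.mem_range] at hj
    by_cases hjn : j < N.toNat
    · rw [if_pos hjn]
      apply List.map_congr_left
      intro c hc
      rw [List.mem_range] at hc
      by_cases hcn : c < N.toNat
      · rw [if_pos (by omega : N.toNat - N.toNat ≤ c ∧ c < N.toNat), if_pos ⟨hjn, hcn⟩]
      · rw [if_neg (by omega : ¬ (N.toNat - N.toNat ≤ c ∧ c < N.toNat)),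
            if_neg (by omega : ¬ (j < N.toNat ∧ c < N.toNat))]
        rfl
    · rw [if_neg hjn]
      symm
      calc (List.range (X.getD j []).length).map (fun c =>
            if j < N.toNat ∧ c < N.toNat then ent X (N.toNat - 1 - c) j else (X.getD j []).getD c 0)
          = (List.range (X.getD j []).length).map (fun c => (X.getD j []).getD c 0) := by
            apply List.map_congr_left
            intro c _
            rw [if_neg (by omega)]
        _ = X.getD j [] := map_range_getD 0 _ _ rfl

-- ---------- rotB = rotC (B's side) ----------
theorem innerPartB (N : Int) (n : Nat) (hn : N.toNat = n) (X : List (List Int)) (r : Nat)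
    (hr : r < n) (acc : List (List Int)) (hrL : r < acc.length) :
    ∀ (j0 : Nat), j0 ≤ n →
    (PySem.List.pyRange 0 (j0 : Int) 1).foldl (fun acc2 c =>
      PySem.List.pySetD acc2 (r : Int)
        (PySem.List.pySetD (PySem.List.pyGetD acc2 (r : Int) []) c
          (PySem.List.pyGetD (PySem.List.pyGetD X (N - 1 - c) []) (r : Int) 0))) acc
    = acc.set r ((List.range (acc.getD r []).length).map (fun c =>
        if c < j0 then ent X (n - 1 - c) r else (acc.getD r []).getD c 0)) := by
  intro j0
  induction j0 with
  | zero =>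
    intro _
    rw [show ((0 : Nat) : Int) = (0 : Int) by simp, PySem.List.pyRange_one_eq_nil (by omega)]
    simp only [List.foldl_nil, Nat.not_lt_zero, if_false]
    rw [map_range_getD 0 _ _ rfl, set_getD_self _ _ _ hrL]
  | succ j0 ihj =>
    intro hj0
    rw [show ((j0 + 1 : Nat) : Int) = ((j0 : Int) + 1) by push_cast; ring]
    rw [PySem.List.pyRange_one_succ_right (by omega)]
    rw [List.foldl_append, ihj (by omega)]
    simp only [List.foldl_cons, List.foldl_nil]
    rw [PySem.List.pyGetD_natCast, getD_set_self _ _ _ _ hrL]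
    rw [show N - 1 - (j0 : Int) = (((n - 1 - j0 : Nat)) : Int) by omega]
    rw [PySem.List.pyGetD_natCast, PySem.List.pyGetD_natCast]
    rw [show (j0 : Int) = ((j0 : Nat) : Int) from rfl, PySem.List.pySetD_natCast,
        PySem.List.pySetD_natCast, List.set_set, set_map_range]
    congr 1
    apply List.map_congr_left
    intro c hc
    rw [List.mem_range] at hc
    by_cases hcj : c = j0
    · subst hcj
      rw [if_pos rfl, if_pos (by omega)]
      rfl
    · rw [if_neg hcj]
      by_cases hlt : c < j0
      · rw [if_pos hlt, if_pos (by omega)]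
      · rw [if_neg hlt, if_neg (by omega)]

theorem outerPartB (N : Int) (n : Nat) (hn : N.toNat = n) (hN : 1 ≤ N)
    (X : List (List Int)) (hL : n ≤ X.length) :
    ∀ (i0 : Nat), i0 ≤ n →
    (PySem.List.pyRange 0 (i0 : Int) 1).foldl (fun out r =>
      (PySem.List.pyRange 0 N 1).foldl (fun acc c =>
        PySem.List.pySetD acc r
          (PySem.List.pySetD (PySem.List.pyGetD acc r []) c
            (PySem.List.pyGetD (PySem.List.pyGetD X (N - 1 - c) []) r 0))) out) X
    = (List.range X.length).map (fun r => if r < i0 then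
        ((List.range (X.getD r []).length).map (fun c =>
          if c < n then ent X (n - 1 - c) r else (X.getD r []).getD c 0))
        else X.getD r []) := by
  intro i0
  induction i0 with
  | zero =>
    intro _
    rw [show PySem.List.pyRange 0 (((0 : Nat) : Nat) : Int) 1 = [] from PySem.List.pyRange_one_eq_nil (by simp)]
    simp only [List.foldl_nil, Nat.not_lt_zero, if_false]
    exact (map_range_getD [] X X.length rfl).symm
  | succ i0 ih =>
    intro hi0
    rw [show ((i0 + 1 : Nat) : Int) = ((i0 : Int) + 1) by push_cast; ring]
    rw [PySem.List.pyRange_one_succ_right (by omega)]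
    rw [List.foldl_append, ih (by omega)]
    simp only [List.foldl_cons, List.foldl_nil]
    rw [show (PySem.List.pyRange 0 N 1) = (PySem.List.pyRange 0 ((n : Nat) : Int) 1) from by congr 1; omega]
    have hlen : i0 < ((List.range X.length).map (fun r => if r < i0 then
        ((List.range (X.getD r []).length).map (fun c =>
          if c < n then ent X (n - 1 - c) r else (X.getD r []).getD c 0))
        else X.getD r [])).length := by simp; omega
    rw [innerPartB N n hn X i0 (by omega) _ hlen n le_rfl]
    rw [getD_map_range' _ X.length i0 _ (by omega), if_neg (by omega)]
    rw [set_map_range]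
    apply List.map_congr_left
    intro r hrm
    rw [List.mem_range] at hrm
    by_cases hri : r = i0
    · subst hri
      rw [if_pos rfl, if_pos (by omega)]
    · rw [if_neg hri]
      by_cases hlt : r < i0
      · rw [if_pos hlt, if_pos (by omega)]
      · rw [if_neg hlt, if_neg (by omega)]

theorem rotB_eq_rotC {N : Int} {X : List (List Int)} (hw : Win N X) :
    rotB N X = rotC N.toNat X := by
  by_cases hneg : N ≤ 0
  · unfold rotB
    rw [PySem.List.pyRange_one_eq_nil hneg]
    simp only [List.foldl_nil]
    rw [show N.toNat = 0 by omega, rotC_zero]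
  · have hN : 1 ≤ N := by omega
    rcases hw with h | ⟨hL, _⟩
    · omega
    unfold rotB
    rw [show (PySem.List.pyRange 0 N 1).foldl (fun out r =>
        (PySem.List.pyRange 0 N 1).foldl (fun acc c =>
          PySem.List.pySetD acc r
            (PySem.List.pySetD (PySem.List.pyGetD acc r []) c
              (PySem.List.pyGetD (PySem.List.pyGetD X (N - 1 - c) []) r 0))) out) X
      = (PySem.List.pyRange 0 ((N.toNat : Nat) : Int) 1).foldl (fun out r =>
        (PySem.List.pyRange 0 N 1).foldl (fun acc c =>
          PySem.List.pySetD acc r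
            (PySem.List.pySetD (PySem.List.pyGetD acc r []) c
              (PySem.List.pyGetD (PySem.List.pyGetD X (N - 1 - c) []) r 0))) out) X from by congr 2; omega]
    rw [outerPartB N N.toNat rfl hN X hL N.toNat le_rfl]
    unfold rotC
    apply List.map_congr_left
    intro r hrm
    rw [List.mem_range] at hrm
    by_cases hrn : r < N.toNat
    · rw [if_pos hrn]
      apply List.map_congr_left
      intro c hcm
      rw [List.mem_range] at hcm
      by_cases hcn : c < N.toNat
      · rw [if_pos hcn, if_pos ⟨hrn, hcn⟩]
      · rw [if_neg hcn, if_neg (by omega : ¬ (r < N.toNat ∧ c < N.toNat))]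
    · rw [if_neg hrn]
      symm
      calc (List.range (X.getD r []).length).map (fun c =>
            if r < N.toNat ∧ c < N.toNat then ent X (N.toNat - 1 - c) r else (X.getD r []).getD c 0)
          = (List.range (X.getD r []).length).map (fun c => (X.getD r []).getD c 0) := by
            apply List.map_congr_left
            intro c _
            rw [if_neg (by omega)]
        _ = X.getD r [] := map_range_getD 0 _ _ rfl

-- on a board covering the play area, A's rotate and B's _rot agree
theorem rotate_eq_rotB {N : Int} {X : List (List Int)} (hw : Win N X) :
    rotate N X = rotB N X := (rotate_eq_rotC hw).trans (rotB_eq_rotC hw).symm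

-- ---------- shapes ----------
theorem slideB_len_ge {N : Int} {row : List Int} (hN : 1 ≤ N) (h : N.toNat ≤ row.length) :
    N.toNat ≤ (slideB N row).length := by
  simp only [slideB, List.length_append, List.length_replicate]
  omega

theorem rotC_length (n : Nat) (X : List (List Int)) : (rotC n X).length = X.length := by
  simp [rotC]

theorem rotC_row_length (n : Nat) (X : List (List Int)) (j : Nat) :
    ((rotC n X).getD j []).length = (X.getD j []).length := by
  unfold rotC
  by_cases hj : j < X.length
  · rw [getD_map_range' _ X.length j _ hj]
    simp
  · rw [List.getD_eq_getElem?_getD, List.getElem?_eq_none (by simp; omega)]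
    rw [List.getD_eq_getElem?_getD (l := X), List.getElem?_eq_none (by omega)]

theorem win_map_slide {N : Int} {X : List (List Int)} (hw : Win N X) :
    Win N (X.map (slideB N)) := by
  rcases hw with h | ⟨hL, hR⟩
  · exact Or.inl h
  by_cases hN : 1 ≤ N
  · refine Or.inr ⟨by simpa using hL, ?_⟩
    intro j hj
    rw [List.getD_eq_getElem?_getD, List.getElem?_map, List.getElem?_eq_getElem (by omega : j < X.length)]
    simp only [Option.map_some, Option.getD_some]
    refine slideB_len_ge hN ?_
    have := hR j hj
    rwa [List.getD_eq_getElem?_getD, List.getElem?_eq_getElem (by omega : j < X.length)] at this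
  · exact Or.inl (by omega)

theorem win_rotB {N : Int} {X : List (List Int)} (hw : Win N X) : Win N (rotB N X) := by
  rw [rotB_eq_rotC hw]
  rcases hw with h | ⟨hL, hR⟩
  · exact Or.inl h
  refine Or.inr ⟨by rw [rotC_length]; exact hL, ?_⟩
  intro j hj
  rw [rotC_row_length]
  exact hR j hj

-- ---------- unfolding of dfsA at a successor ----------
theorem dfsA_succ (f : Nat) (N : Int) (B : List (List Int)) :
    dfsA (f + 1) N B =
      max (max (max (max (bm B)
        (dfsA f N (B.map (convert N))))
        (dfsA f N ((rotate N B).map (convert N))))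
        (dfsA f N ((rotate N (rotate N B)).map (convert N))))
        (dfsA f N ((rotate N (rotate N (rotate N B))).map (convert N))) := by
  rw [dfsA]
  rw [show List.range 4 = [0, 1, 2, 3] from rfl]
  simp only [List.foldl_cons, List.foldl_nil, bm]

theorem bm_le_dfsA (f : Nat) (N : Int) (B : List (List Int)) : bm B ≤ dfsA f N B := by
  cases f with
  | zero => exact le_refl _
  | succ f => rw [dfsA_succ]; omega

-- ---------- the worklist computes the DFS ----------
theorem loopLemma {N : Int} : ∀ (m : Nat) (stack : List (List (List Int) × Int)),
    (stack.map (fun p => 5 ^ p.2.toNat)).sum ≤ m →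
    (∀ p ∈ stack, 0 < p.2 → Win N p.1) →
    ∀ best, dfsLoop N stack best
      = stack.foldl (fun acc p => max acc (dfsA p.2.toNat N p.1)) best := by
  intro m
  induction m with
  | zero =>
    intro stack hm hw best
    have : stack = [] := by
      cases stack with
      | nil => rfl
      | cons p rest =>
        exfalso
        simp only [List.map_cons, List.sum_cons] at hm
        have : 0 < 5 ^ p.2.toNat := Nat.pow_pos (by omega)
        omega
    subst this
    rw [dfsLoop]
    rfl
  | succ m ih =>
    intro stack hm hw best
    cases stack with
    | nil => rw [dfsLoop]; rfl
    | cons p rest =>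
      obtain ⟨board, depth⟩ := p
      simp only [List.map_cons, List.sum_cons] at hm
      by_cases hd : depth ≤ 0
      · rw [dfsLoop]
        simp only [hd, dite_true]
        rw [ih rest (by have : 0 < 5 ^ depth.toNat := Nat.pow_pos (by omega); omega)
          (fun q hq => hw q (List.mem_cons_of_mem _ hq))]
        rw [List.foldl_cons]
        congr 2
        have : depth.toNat = 0 := by omega
        rw [this]
        rfl
      · rw [dfsLoop]
        simp only [hd, dite_false]
        have hwb : Win N board := hw (board, depth) List.mem_cons_self (by omega)
        have hw1 : Win N (rotB N board) := win_rotB hwb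
        have hw2 : Win N (rotB N (rotB N board)) := win_rotB hw1
        have hw3 : Win N (rotB N (rotB N (rotB N board))) := win_rotB hw2
        have hmeas : ((((rotB N (rotB N (rotB N board))).map (slideB N), depth - 1) ::
            ((rotB N (rotB N board)).map (slideB N), depth - 1) ::
            ((rotB N board).map (slideB N), depth - 1) ::
            (board.map (slideB N), depth - 1) :: rest).map (fun p => 5 ^ p.2.toNat)).sum ≤ m := by
          simp only [List.map_cons, List.sum_cons]
          have h5 : depth.toNat = (depth - 1).toNat + 1 := by omega
          have h0 : 0 < 5 ^ (depth - 1).toNat := Nat.pow_pos (by omega)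
          rw [h5] at hm
          rw [pow_succ] at hm
          omega
        rw [ih _ hmeas ?_]
        · simp only [List.foldl_cons]
          have hfu : depth.toNat = (depth - 1).toNat + 1 := by omega
          have hA : dfsA depth.toNat N board =
              max (max (max (max (bm board)
                (dfsA (depth - 1).toNat N (board.map (convert N))))
                (dfsA (depth - 1).toNat N ((rotate N board).map (convert N))))
                (dfsA (depth - 1).toNat N ((rotate N (rotate N board)).map (convert N))))
                (dfsA (depth - 1).toNat N ((rotate N (rotate N (rotate N board))).map (convert N))) := by
            rw [hfu, dfsA_succ]
          have hc : ∀ (X : List (List Int)), X.map (convert N) = X.map (slideB N) :=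
            fun X => by simp [convert_eq_slideB]
          rw [rotate_eq_rotB hwb] at hA
          rw [rotate_eq_rotB hw1] at hA
          rw [rotate_eq_rotB hw2] at hA
          rw [hc, hc, hc, hc] at hA
          have hfold : ∀ (l : List (List (List Int) × Int)) (x y : Int), x = y →
              l.foldl (fun acc p => max acc (dfsA p.2.toNat N p.1)) x
                = l.foldl (fun acc p => max acc (dfsA p.2.toNat N p.1)) y := by
            intro l x y h; rw [h]
          apply hfold
          rw [hA]
          exact max_merge6 _ _ _ _ _ _
        · intro q hq h0
          simp only [List.mem_cons] at hq
          rcases hq with rfl | rfl | rfl | rfl | hq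
          · exact win_map_slide hw3
          · exact win_map_slide hw2
          · exact win_map_slide hw1
          · exact win_map_slide hwb
          · exact hw q (List.mem_cons_of_mem _ hq) h0

-- ===== VERDICT (by name: the statement is the Claim_ definition above) =====
theorem dfs_spec : Claim_equal_dfs := by
  intro N B count _hdom hpre
  obtain ⟨hc, hne, hrow, hcase⟩ := hpre
  unfold Spec_dfs dfs dfs_alt
  have hwin : 0 < count → Win N B := by
    intro h0
    rcases hcase with h | ⟨hN, hL, hR⟩ | ⟨hneg, _⟩
    · omega
    · exact Or.inr ⟨hL, hR⟩
    · exact Or.inl hneg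
  have hstack : ∀ p ∈ [(B, count)], 0 < p.2 → Win N p.1 := by
    intro p hp h0
    simp only [List.mem_singleton] at hp
    subst hp
    exact hwin h0
  rw [loopLemma (N := N) ((([(B, count)]).map (fun p => 5 ^ p.2.toNat)).sum) [(B, count)] le_rfl hstack]
  simp only [List.foldl_cons, List.foldl_nil]
  have : bm B ≤ dfsA count.toNat N B := bm_le_dfsA _ _ _
  unfold bm at this
  omega
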